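-- pv_equiv track=rewrite | github.com/CarpseDeam/AurA-Ev0 | tests/unit/test_planning_service.py | detect_duplicate_concepts
-- ===== SOURCE A (Python) =====
-- from typing import List, Set
--
-- def detect_duplicate_concepts(prompts: List[str]) -> List[tuple[str, str]]:
--     """Detect potential duplicate work across session prompts."""
--     duplicates = []
--     key_phrases = [
--         "user model",
--         "authentication",
--         "database",
--         "routes",
--         "api endpoints",
--         "validation",
--         "error handling",
--         "tests",
--     ]
--
--     for phrase in key_phrases:
--         occurrences = []
--         for idx, prompt in enumerate(prompts):
--             if phrase in prompt.lower():
--                 is_creation = any(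
--                     word in prompt.lower() for word in ["create", "build", "implement", "add"]
--                 )
--                 if is_creation:
--                     occurrences.append((idx, "create"))
--                 else:
--                     occurrences.append((idx, "use"))
--
--         creation_count = sum(1 for _, action in occurrences if action == "create")
--         if creation_count > 1:
--             duplicates.append((phrase, f"Created in {creation_count} different sessions"))
--
--     return duplicates
-- ===== SOURCE B (Python) =====
-- def detect_duplicate_concepts(prompts):
--     """Detect potential duplicate work across session prompts."""
--     key_phrases = [
--         "user model",
--         "authentication",
--         "database",
--         "routes",
--         "api endpoints",
--         "validation",
--         "error handling",
--         "tests",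
--     ]
--     creation_words = ["create", "build", "implement", "add"]
--     counts = {}
--     for prompt in prompts:
--         low = prompt.lower()
--         if any(word in low for word in creation_words):
--             for phrase in key_phrases:
--                 if phrase in low:
--                     counts[phrase] = counts.get(phrase, 0) + 1
--     return [
--         (phrase, f"Created in {counts[phrase]} different sessions")
--         for phrase in key_phrases
--         if counts.get(phrase, 0) > 1
--     ]
-- ===== Notes on version B (the rewrite author's own statement) =====
-- stated objective: simpler
-- what changed: One pass over the prompts maintaining a phrase-count dictionary (lowering each prompt and testing the creation words once per prompt), then one comprehension over key_phrases, instead of re-scanning all prompts and rebuilding an occurrences list (with unused 'use' entries) for each of the 8 phrases.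
import Mathlib
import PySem

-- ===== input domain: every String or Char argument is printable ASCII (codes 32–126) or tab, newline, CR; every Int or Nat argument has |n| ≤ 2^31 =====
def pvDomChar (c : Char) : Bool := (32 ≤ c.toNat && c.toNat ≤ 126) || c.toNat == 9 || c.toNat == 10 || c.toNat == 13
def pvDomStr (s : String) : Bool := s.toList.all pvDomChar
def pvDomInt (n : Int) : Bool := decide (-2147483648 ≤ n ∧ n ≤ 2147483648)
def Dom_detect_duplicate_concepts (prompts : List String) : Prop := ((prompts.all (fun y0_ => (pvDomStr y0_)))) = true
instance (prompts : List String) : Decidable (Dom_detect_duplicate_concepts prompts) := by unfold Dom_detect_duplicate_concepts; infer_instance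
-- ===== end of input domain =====

-- B replaces A's per-phrase re-scan of all prompts (building occurrence lists whose
-- "use" entries are never read) by a single pass over the prompts maintaining a
-- count dictionary; objective: simpler.

-- ===== PORT A =====
def pvKeyPhrases : List String :=
  ["user model", "authentication", "database", "routes",
   "api endpoints", "validation", "error handling", "tests"]

def pvCreationWords : List String := ["create", "build", "implement", "add"]

def detect_duplicate_concepts (prompts : List String) : List (String × String) :=
  pvKeyPhrases.foldl (fun duplicates phrase =>
    let occurrences : List (Int × String) :=
      (PySem.List.enumerate prompts).foldl (fun occ ip =>
        if PySem.Str.isIn phrase (PySem.Str.lower ip.2) then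
          let is_creation := pvCreationWords.any
            (fun word => PySem.Str.isIn word (PySem.Str.lower ip.2))
          if is_creation then occ ++ [(ip.1, "create")] else occ ++ [(ip.1, "use")]
        else occ) []
    let creation_count : Int :=
      (occurrences.map (fun oc => if oc.2 == "create" then (1 : Int) else 0)).sum
    if creation_count > 1 then
      duplicates ++
        [(phrase, "Created in " ++ PySem.Int.toStr creation_count ++ " different sessions")]
    else duplicates) []

-- ===== PORT B =====
def detect_duplicate_concepts_alt (prompts : List String) : List (String × String) :=
  let counts : PySem.Dict String Int :=
    prompts.foldl (fun counts prompt =>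
      let low := PySem.Str.lower prompt
      if pvCreationWords.any (fun word => PySem.Str.isIn word low) then
        pvKeyPhrases.foldl (fun c phrase =>
          if PySem.Str.isIn phrase low then c.modify phrase 0 (· + 1) else c) counts
      else counts) PySem.Dict.empty
  (pvKeyPhrases.filter (fun phrase => counts.getD phrase 0 > 1)).map
    (fun phrase =>
      (phrase, "Created in " ++ PySem.Int.toStr (counts.getD phrase 0) ++ " different sessions"))

-- ===== PRECONDITION & SPEC =====
def Spec_detect_duplicate_concepts (prompts : List String) (out : List (String × String)) : Prop := out = detect_duplicate_concepts_alt prompts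
instance (prompts : List String) (out : List (String × String)) : Decidable (Spec_detect_duplicate_concepts prompts out) := by unfold Spec_detect_duplicate_concepts; infer_instance

-- ===== CLAIM (what is proved, stated in full; the proofs are below) =====
def Claim_equal_detect_duplicate_concepts : Prop := ∀ (prompts : List String), Dom_detect_duplicate_concepts prompts → Spec_detect_duplicate_concepts prompts (detect_duplicate_concepts prompts)

-- ===== LEMMAS AND PROOFS =====

-- the predicate both programs count: phrase occurs in the lowered prompt and the prompt is a creation prompt
def pvHit (phrase s : String) : Bool :=
  PySem.Str.isIn phrase (PySem.Str.lower s) &&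
    pvCreationWords.any (fun word => PySem.Str.isIn word (PySem.Str.lower s))

-- A side: the number of "create" entries among the occurrences is the number of hits
theorem a_count (phrase : String) (l : List (Int × String)) (acc : List (Int × String)) :
    ((l.foldl (fun occ ip =>
        if PySem.Str.isIn phrase (PySem.Str.lower ip.2) then
          if pvCreationWords.any (fun word => PySem.Str.isIn word (PySem.Str.lower ip.2)) then
            occ ++ [(ip.1, "create")] else occ ++ [(ip.1, "use")]
        else occ) acc).map (fun oc => if oc.2 == "create" then (1 : Int) else 0)).sum
      = ((acc.map (fun oc => if oc.2 == "create" then (1 : Int) else 0)).sum : Int)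
        + (l.countP (fun ip => pvHit phrase ip.2) : Int) := by
  induction l generalizing acc with
  | nil => simp
  | cons x xs ih =>
    simp only [List.foldl_cons, List.countP_cons]
    by_cases h1 : PySem.Str.isIn phrase (PySem.Str.lower x.2) = true
    · by_cases h2 : pvCreationWords.any (fun word => PySem.Str.isIn word (PySem.Str.lower x.2)) = true
      · rw [if_pos h1, if_pos h2, ih]
        have hh : pvHit phrase x.2 = true := by unfold pvHit; rw [h1, h2]; rfl
        simp only [hh, List.map_append, List.sum_append, List.map_cons, List.map_nil]
        push_cast
        simp
        ring
      · rw [if_pos h1, if_neg h2, ih]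
        have h2' := (Bool.not_eq_true _).mp h2
        have hh : pvHit phrase x.2 = false := by unfold pvHit; rw [h2', Bool.and_false]
        simp only [hh, List.map_append, List.sum_append, List.map_cons, List.map_nil]
        simp
    · rw [if_neg h1, ih]
      have h1' := (Bool.not_eq_true _).mp h1
      have hh : pvHit phrase x.2 = false := by unfold pvHit; rw [h1', Bool.false_and]
      simp [hh]

-- B side: the final dictionary holds the hit count of every key phrase
theorem b_count (phrase : String) (hm : phrase ∈ pvKeyPhrases) (prompts : List String)
    (d : PySem.Dict String Int) :
    (prompts.foldl (fun counts prompt =>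
        if pvCreationWords.any (fun word => PySem.Str.isIn word (PySem.Str.lower prompt)) then
          pvKeyPhrases.foldl (fun c ph =>
            if PySem.Str.isIn ph (PySem.Str.lower prompt) then c.modify ph 0 (· + 1) else c) counts
        else counts) d).getD phrase 0
      = d.getD phrase 0 + (prompts.countP (fun s => pvHit phrase s) : Int) := by
  induction prompts generalizing d with
  | nil => simp
  | cons p ps ih =>
    simp only [List.foldl_cons, List.countP_cons]
    by_cases h2 : pvCreationWords.any (fun word => PySem.Str.isIn word (PySem.Str.lower p)) = true
    · rw [if_pos h2, ih, ← List.foldl_filter (p := fun ph => PySem.Str.isIn ph (PySem.Str.lower p)),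
        PySem.Dict.getD_foldl_modify_add_one]
      have hnd : (pvKeyPhrases.filter (fun ph => PySem.Str.isIn ph (PySem.Str.lower p))).Nodup :=
        List.Nodup.filter _ (by decide)
      by_cases h1 : PySem.Str.isIn phrase (PySem.Str.lower p) = true
      · have hmf : phrase ∈ pvKeyPhrases.filter (fun ph => PySem.Str.isIn ph (PySem.Str.lower p)) :=
          List.mem_filter.mpr ⟨hm, h1⟩
        rw [List.count_eq_one_of_mem hnd hmf]
        have hh : pvHit phrase p = true := by unfold pvHit; rw [h1, h2]; rfl
        simp only [hh]
        push_cast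
        ring
      · have hmf : phrase ∉ pvKeyPhrases.filter (fun ph => PySem.Str.isIn ph (PySem.Str.lower p)) := by
          intro hc
          exact h1 (List.mem_filter.mp hc).2
        rw [List.count_eq_zero_of_not_mem hmf]
        have h1' := (Bool.not_eq_true _).mp h1
        have hh : pvHit phrase p = false := by unfold pvHit; rw [h1', Bool.false_and]
        simp [hh]
    · rw [if_neg h2, ih]
      have h2' := (Bool.not_eq_true _).mp h2
      have hh : pvHit phrase p = false := by unfold pvHit; rw [h2', Bool.and_false]
      simp [hh]

-- both programs build the same filtered, formatted list once their counts agree on the phrases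
theorem fold_build (ks : List String) (C D : String → Int) (hCD : ∀ k ∈ ks, C k = D k)
    (acc : List (String × String)) :
    ks.foldl (fun dup ph =>
        if C ph > 1 then
          dup ++ [(ph, "Created in " ++ PySem.Int.toStr (C ph) ++ " different sessions")]
        else dup) acc
      = acc ++ (ks.filter (fun ph => D ph > 1)).map
          (fun ph => (ph, "Created in " ++ PySem.Int.toStr (D ph) ++ " different sessions")) := by
  induction ks generalizing acc with
  | nil => simp
  | cons k ks ih =>
    have hk : C k = D k := hCD k (by simp)
    simp only [List.foldl_cons, List.filter_cons, hk]
    by_cases h : D k > 1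
    · rw [if_pos h, ih (fun x hx => hCD x (by simp [hx])) _]
      simp [h]
    · rw [if_neg h, ih (fun x hx => hCD x (by simp [hx])) _]
      simp [h]

-- ===== VERDICT (by name: the statement is the Claim_ definition above) =====
theorem detect_duplicate_concepts_spec : Claim_equal_detect_duplicate_concepts := by
  intro prompts _
  show detect_duplicate_concepts prompts = detect_duplicate_concepts_alt prompts
  simp only [detect_duplicate_concepts, detect_duplicate_concepts_alt]
  refine (fold_build pvKeyPhrases _ _ ?_ []).trans (List.nil_append _)
  intro k hk
  rw [a_count, b_count k hk]
  have hcnt : List.countP (fun ip => pvHit k ip.2) (PySem.List.enumerate prompts)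
      = List.countP (fun s => pvHit k s) prompts := by
    rw [show (fun (ip : Int × String) => pvHit k ip.2)
          = (fun s => pvHit k s) ∘ (fun (ip : Int × String) => ip.2) from rfl,
      ← List.countP_map, PySem.List.map_snd_enumerate]
  rw [hcnt]
  simp
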